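-- pv_equiv track=rewrite | github.com/keyurgolani/ProblemSolving | GoogleChallenges/DoomsdayFuel/solution.py | terminal_submatrices
-- ===== SOURCE A (Python) =====
-- def terminal_submatrices(mat, terminal_states):
--     n2t = []
--     n2n = []
--     for row, is_src_terminal in zip(mat, terminal_states):
--         n2t_row = []
--         n2n_row = []
--         for element, is_dst_terminal in zip(row, terminal_states):
--             if not is_src_terminal:
--                 if is_dst_terminal:
--                     n2t_row.append(element)
--                 else:
--                     n2n_row.append(element)
--         if n2t_row:
--             n2t.append(n2t_row)
--         if n2n_row:
--             n2n.append(n2n_row)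
--     return n2t, n2n
-- ===== SOURCE B (Python) =====
-- def terminal_submatrices(mat, terminal_states):
--     def split_row(row, k):
--         if k >= len(row) or k >= len(terminal_states):
--             return [], []
--         t, n = split_row(row, k + 1)
--         if terminal_states[k]:
--             return [row[k]] + t, n
--         return t, [row[k]] + n
--
--     def go(k):
--         if k >= len(mat) or k >= len(terminal_states):
--             return [], []
--         n2t, n2n = go(k + 1)
--         if terminal_states[k]:
--             return n2t, n2n
--         t, n = split_row(mat[k], 0)
--         return ([t] + n2t if t else n2t), ([n] + n2n if n else n2n)
--
--     return go(0)
-- ===== Notes on version B (the rewrite author's own statement) =====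
-- stated objective: alternative
-- what changed: B replaces A's iterative nested loops with append accumulators by two index recursions that walk to the end of the rows/flags and build the row split and both submatrices back-to-front by consing on the way out of the recursion.
import Mathlib
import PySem

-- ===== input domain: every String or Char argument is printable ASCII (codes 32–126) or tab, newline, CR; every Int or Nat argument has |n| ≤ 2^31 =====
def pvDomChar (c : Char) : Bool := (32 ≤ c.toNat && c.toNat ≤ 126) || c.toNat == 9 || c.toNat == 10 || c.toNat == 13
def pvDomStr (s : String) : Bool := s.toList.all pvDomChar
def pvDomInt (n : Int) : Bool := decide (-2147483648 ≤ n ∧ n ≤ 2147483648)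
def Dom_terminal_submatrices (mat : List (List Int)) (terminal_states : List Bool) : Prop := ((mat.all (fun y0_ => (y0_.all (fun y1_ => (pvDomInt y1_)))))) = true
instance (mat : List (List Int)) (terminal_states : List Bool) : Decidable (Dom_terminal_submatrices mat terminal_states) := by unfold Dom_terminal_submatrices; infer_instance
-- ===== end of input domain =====

-- B rewrites A's iterative nested loops as a pair of index recursions that build both
-- submatrices back-to-front by consing; objective: alternative (same asymptotic cost).

-- ===== PORT A =====
def terminal_submatrices (mat : List (List Int)) (terminal_states : List Bool) : List (List Int) × List (List Int) :=
  (List.zip mat terminal_states).foldl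
    (fun acc p =>
      let inner := (List.zip p.1 terminal_states).foldl
        (fun (r : List Int × List Int) q =>
          if !p.2 then
            if q.2 then (r.1 ++ [q.1], r.2) else (r.1, r.2 ++ [q.1])
          else r)
        ([], [])
      ((if inner.1 ≠ [] then acc.1 ++ [inner.1] else acc.1),
       (if inner.2 ≠ [] then acc.2 ++ [inner.2] else acc.2)))
    ([], [])

-- ===== PORT B =====
-- Source B's split_row(row, k): recurse to the end of row/terminal_states, cons front elements on the way back.
def pvSplitRow (row : List Int) (ts : List Bool) (k : Nat) : List Int × List Int :=
  if h : k < row.length ∧ k < ts.length then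
    let p := pvSplitRow row ts (k + 1)
    if ts[k]'h.2 then (row[k]'h.1 :: p.1, p.2) else (p.1, row[k]'h.1 :: p.2)
  else ([], [])
termination_by row.length - k

-- Source B's go(k): recurse to the last source row, cons non-empty row splits on the way back.
def pvGo (mat : List (List Int)) (ts : List Bool) (k : Nat) : List (List Int) × List (List Int) :=
  if h : k < mat.length ∧ k < ts.length then
    let rest := pvGo mat ts (k + 1)
    if ts[k]'h.2 then rest
    else
      let p := pvSplitRow (mat[k]'h.1) ts 0
      ((if p.1 ≠ [] then p.1 :: rest.1 else rest.1),
       (if p.2 ≠ [] then p.2 :: rest.2 else rest.2))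
  else ([], [])
termination_by mat.length - k

def terminal_submatrices_alt (mat : List (List Int)) (terminal_states : List Bool) : List (List Int) × List (List Int) :=
  pvGo mat terminal_states 0

-- ===== PRECONDITION & SPEC =====
def Spec_terminal_submatrices (mat : List (List Int)) (terminal_states : List Bool) (out : List (List Int) × List (List Int)) : Prop := out = terminal_submatrices_alt mat terminal_states
instance (mat : List (List Int)) (terminal_states : List Bool) (out : List (List Int) × List (List Int)) : Decidable (Spec_terminal_submatrices mat terminal_states out) := by unfold Spec_terminal_submatrices; infer_instance

-- ===== CLAIM (what is proved, stated in full; the proofs are below) =====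
def Claim_equal_terminal_submatrices : Prop := ∀ (mat : List (List Int)) (terminal_states : List Bool), Dom_terminal_submatrices mat terminal_states → Spec_terminal_submatrices mat terminal_states (terminal_submatrices mat terminal_states)

-- ===== LEMMAS AND PROOFS =====

-- Structural (cons-based) restatements of B's two index recursions, used only in the proofs.
def pvSplitRowS : List Int → List Bool → List Int × List Int
  | [], _ => ([], [])
  | _, [] => ([], [])
  | x :: r, f :: fs =>
      let p := pvSplitRowS r fs
      if f then (x :: p.1, p.2) else (p.1, x :: p.2)

def pvGoS (ts : List Bool) : List (List Int) → List Bool → List (List Int) × List (List Int)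
  | [], _ => ([], [])
  | _, [] => ([], [])
  | row :: rows, f :: fs =>
      let rest := pvGoS ts rows fs
      if f then rest
      else
        let p := pvSplitRowS row ts
        ((if p.1 ≠ [] then p.1 :: rest.1 else rest.1),
         (if p.2 ≠ [] then p.2 :: rest.2 else rest.2))

-- B's index recursion over the row equals the structural split of the dropped suffixes.
theorem splitRow_bridge (row : List Int) (ts : List Bool) : ∀ (n k : Nat), row.length - k ≤ n →
    pvSplitRow row ts k = pvSplitRowS (row.drop k) (ts.drop k) := by
  intro n
  induction n with
  | zero =>
    intro k hk
    rw [pvSplitRow]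
    have hge : row.length ≤ k := by omega
    rw [List.drop_eq_nil_iff.mpr hge]
    simp [pvSplitRowS, hge, Nat.not_lt.mpr hge]
  | succ n ih =>
    intro k hk
    rw [pvSplitRow]
    by_cases h : k < row.length ∧ k < ts.length
    · rw [dif_pos h, List.drop_eq_getElem_cons h.1, List.drop_eq_getElem_cons h.2,
         ih (k + 1) (by omega)]
      by_cases hf : ts[k]'h.2 = true <;> simp [pvSplitRowS, hf]
    · rw [dif_neg h]
      rcases Nat.lt_or_ge k row.length with hr | hr
      · have hts : ts.length ≤ k := by omega
        rw [List.drop_eq_nil_iff.mpr hts]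
        rcases hd : row.drop k with _ | ⟨x, r⟩ <;> simp [pvSplitRowS]
      · rw [List.drop_eq_nil_iff.mpr hr]; simp [pvSplitRowS]

-- B's index recursion over the rows equals the structural driver on the dropped suffixes.
theorem go_bridge (mat : List (List Int)) (ts : List Bool) : ∀ (n k : Nat), mat.length - k ≤ n →
    pvGo mat ts k = pvGoS ts (mat.drop k) (ts.drop k) := by
  intro n
  induction n with
  | zero =>
    intro k hk
    rw [pvGo]
    have hge : mat.length ≤ k := by omega
    rw [List.drop_eq_nil_iff.mpr hge]
    simp [pvGoS, Nat.not_lt.mpr hge]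
  | succ n ih =>
    intro k hk
    rw [pvGo]
    by_cases h : k < mat.length ∧ k < ts.length
    · rw [dif_pos h, List.drop_eq_getElem_cons h.1, List.drop_eq_getElem_cons h.2,
         ih (k + 1) (by omega),
         splitRow_bridge (mat[k]'h.1) ts (mat[k]'h.1).length 0 (by omega)]
      by_cases hf : ts[k]'h.2 = true <;> simp [pvGoS, hf]
    · rw [dif_neg h]
      rcases Nat.lt_or_ge k mat.length with hr | hr
      · have hts : ts.length ≤ k := by omega
        rw [List.drop_eq_nil_iff.mpr hts]
        rcases hd : mat.drop k with _ | ⟨x, r⟩ <;> simp [pvGoS]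
      · rw [List.drop_eq_nil_iff.mpr hr]; simp [pvGoS]

-- A's inner fold (for a non-terminal source) appends exactly B's row split.
theorem innerA_eq (row : List Int) (ts : List Bool) : ∀ (a b : List Int),
    (List.zip row ts).foldl (fun (r : List Int × List Int) q =>
        if q.2 then (r.1 ++ [q.1], r.2) else (r.1, r.2 ++ [q.1])) (a, b)
      = (a ++ (pvSplitRowS row ts).1, b ++ (pvSplitRowS row ts).2) := by
  induction row generalizing ts with
  | nil => intro a b; simp [pvSplitRowS]
  | cons x r ih =>
    intro a b
    cases ts with
    | nil => simp [pvSplitRowS]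
    | cons f fs =>
      cases f <;> simp [pvSplitRowS, ih fs]

-- A's outer fold from any accumulator appends B's recursive result.
theorem outerA_eq (ts : List Bool) : ∀ (rows : List (List Int)) (fs : List Bool)
    (A B : List (List Int)),
    (List.zip rows fs).foldl
      (fun acc p =>
        let inner := (List.zip p.1 ts).foldl
          (fun (r : List Int × List Int) q =>
            if !p.2 then
              if q.2 then (r.1 ++ [q.1], r.2) else (r.1, r.2 ++ [q.1])
            else r)
          ([], [])
        ((if inner.1 ≠ [] then acc.1 ++ [inner.1] else acc.1),
         (if inner.2 ≠ [] then acc.2 ++ [inner.2] else acc.2)))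
      (A, B)
      = (A ++ (pvGoS ts rows fs).1, B ++ (pvGoS ts rows fs).2) := by
  intro rows
  induction rows with
  | nil => intro fs A B; simp [pvGoS]
  | cons row rest ih =>
    intro fs A B
    cases fs with
    | nil => simp [pvGoS]
    | cons f fs =>
      cases f with
      | true =>
        have hid : (List.zip row ts).foldl
            (fun (r : List Int × List Int) q =>
              if !(true : Bool) then
                if q.2 then (r.1 ++ [q.1], r.2) else (r.1, r.2 ++ [q.1])
              else r) ([], []) = (([] : List Int), ([] : List Int)) := by
          induction (List.zip row ts) with
          | nil => rfl
          | cons q l ihq => simpa using ihq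
        simp only [List.zip_cons_cons, List.foldl_cons, hid]
        simp only [pvGoS]
        exact ih fs A B
      | false =>
        have h := innerA_eq row ts [] []
        simp only [List.nil_append] at h
        simp only [List.zip_cons_cons, List.foldl_cons, Bool.not_false, if_true, h]
        rw [ih fs]
        rcases hp : pvSplitRowS row ts with ⟨t, n⟩
        by_cases ht : t = [] <;> by_cases hn : n = [] <;>
          simp [pvGoS, hp, ht, hn]

-- ===== VERDICT (by name: the statement is the Claim_ definition above) =====
theorem terminal_submatrices_spec : Claim_equal_terminal_submatrices := by
  intro mat ts _
  unfold Spec_terminal_submatrices terminal_submatrices terminal_submatrices_alt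
  rw [go_bridge mat ts mat.length 0 (by omega)]
  simpa using outerA_eq ts mat ts [] []
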